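-- pv_equiv track=rewrite | github.com/kalaydzhyan/county-parser | bin/parser_callahan.py | extract_name_address
-- ===== SOURCE A (Python) =====
-- def extract_name_address(string):
--     bad_content   = ('AGT:', 'MTG:', 'OWNER INTEREST')
--     address_start = ('PO BOX', 'P O Box', '%', 'C/O', 'P. L.') + tuple(str(int('0')+i) for i in range(10))
--     owner_name    = ''
--     owner_address = ''
--
--     if string:
--         lines        = string.split(', ')
--         address_flag = False
--         owner_name   = lines[0]
--         for line in lines[1:]:
--             if any(line.startswith(bad_content) for item in bad_content):
--                 break
--
--             address_flag = line.startswith(address_start) or address_flag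
--
--             if address_flag:
--                 owner_address = owner_address + ', ' + line if owner_address else line
--             else:
--                 owner_name = owner_name + ' ' + line
--
--     return owner_name, owner_address
-- ===== SOURCE B (Python) =====
-- def extract_name_address(string):
--     bad_content   = ('AGT:', 'MTG:', 'OWNER INTEREST')
--     address_start = ('PO BOX', 'P O Box', '%', 'C/O', 'P. L.') + tuple(str(int('0')+i) for i in range(10))
--     if not string:
--         return '', ''
--     lines = string.split(', ')
--     body = lines[1:]
--     cut = next((i for i, l in enumerate(body) if l.startswith(bad_content)), len(body))
--     body = body[:cut]
--     idx = next((i for i, l in enumerate(body) if l.startswith(address_start)), len(body))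
--     return ' '.join([lines[0]] + body[:idx]), ', '.join(body[idx:])
-- ===== Notes on version B (the rewrite author's own statement) =====
-- stated objective: simpler
-- what changed: A's single stateful loop with a sticky address_flag, a break and two string accumulators is replaced by computing the two split positions (first bad-content line, first address-start line) with findIdx-style scans over the split lines and assembling the two results by joining slices.
import Mathlib
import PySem

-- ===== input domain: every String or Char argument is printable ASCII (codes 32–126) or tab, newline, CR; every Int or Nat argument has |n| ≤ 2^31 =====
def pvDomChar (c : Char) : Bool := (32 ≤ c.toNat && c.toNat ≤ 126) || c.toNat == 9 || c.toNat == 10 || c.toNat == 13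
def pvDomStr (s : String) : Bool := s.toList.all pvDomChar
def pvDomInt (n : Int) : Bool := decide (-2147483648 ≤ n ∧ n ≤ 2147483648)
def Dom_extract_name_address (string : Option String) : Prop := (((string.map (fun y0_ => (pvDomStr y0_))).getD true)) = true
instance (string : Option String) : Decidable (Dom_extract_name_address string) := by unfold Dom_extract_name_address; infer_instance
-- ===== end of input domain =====

-- B replaces A's stateful flag/accumulator loop by computing the two split indices and joining the slices; objective: simpler.

-- ===== PORT A =====
-- bad_content / address_start: the same constant tuples both Pythons build
def pvBadContent : List String := ["AGT:", "MTG:", "OWNER INTEREST"]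
def pvAddressStart : List String :=
  ["PO BOX", "P O Box", "%", "C/O", "P. L."] ++
    (PySem.List.pyRange 0 10 1).map (fun i => PySem.Int.toStr (((PySem.Int.ofStr? "0").getD 0) + i))

-- line.startswith(tuple_of_prefixes)
def pvStarts (ps : List String) (line : String) : Bool := ps.any (fun p => PySem.Str.startswith line p)

-- the for-loop over lines[1:], with its break; state = (address_flag, owner_name, owner_address)
def pvLoopA : List String → Bool → String → String → String × String
  | [], _flag, name, addr => (name, addr)
  | line :: rest, flag, name, addr =>
    -- A's 'any(line.startswith(bad_content) for item in bad_content)' tests the whole tuple once per item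
    if pvBadContent.any (fun _item => pvStarts pvBadContent line) then (name, addr)
    else
      let flag' := pvStarts pvAddressStart line || flag
      if flag' then
        pvLoopA rest flag' name (if addr ≠ "" then addr ++ ", " ++ line else line)
      else
        pvLoopA rest flag' (name ++ " " ++ line) addr

def extract_name_address (string : Option String) : String × String :=
  match string with
  | none => ("", "")                -- 'if string:' is false
  | some s =>
    if s = "" then ("", "")         -- 'if string:' is false
    else
      -- split? is `some` exactly because the separator ", " is nonempty; getD is never taken
      let lines := (PySem.Str.split? s ", ").getD []
      -- lines[0]: str.split always returns a nonempty list, so headD's default is never taken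
      pvLoopA (lines.drop 1) false (lines.headD "") ""

-- ===== PORT B =====
def extract_name_address_alt (string : Option String) : String × String :=
  match string with
  | none => ("", "")
  | some s =>
    if s = "" then ("", "")
    else
      let lines := (PySem.Str.split? s ", ").getD []   -- separator nonempty: always `some`
      let body0 := lines.drop 1
      -- next((i for i,l in enumerate(body) if l.startswith(bad_content)), len(body))
      let cut := (body0.findIdx? (fun l => pvStarts pvBadContent l)).getD body0.length
      let body := body0.take cut
      let idx := (body.findIdx? (fun l => pvStarts pvAddressStart l)).getD body.length
      (PySem.Str.join " " (lines.headD "" :: body.take idx), PySem.Str.join ", " (body.drop idx))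

-- ===== PRECONDITION & SPEC =====
def Spec_extract_name_address (string : Option String) (out : String × String) : Prop := out = extract_name_address_alt string
instance (string : Option String) (out : String × String) : Decidable (Spec_extract_name_address string out) := by unfold Spec_extract_name_address; infer_instance

-- ===== CLAIM (what is proved, stated in full; the proofs are below) =====
def Claim_equal_extract_name_address : Prop := ∀ (string : Option String), Dom_extract_name_address string → Spec_extract_name_address string (extract_name_address string)

-- ===== LEMMAS AND PROOFS =====

-- proof-only abbreviations for B's two split indices
def pvBody (rest : List String) : List String :=
  rest.take ((rest.findIdx? (fun l => pvStarts pvBadContent l)).getD rest.length)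
def pvIdx (rest : List String) : Nat :=
  ((pvBody rest).findIdx? (fun l => pvStarts pvAddressStart l)).getD (pvBody rest).length

lemma pv_join_nil (sep : String) : PySem.Str.join sep [] = "" :=
  String.toList_injective (by simp [PySem.Str.toList_join, PySem.Chars.join_nil])

lemma pv_join_single (sep x : String) : PySem.Str.join sep [x] = x :=
  String.toList_injective (by simp [PySem.Str.toList_join, PySem.Chars.join_singleton])

lemma pv_join_cons2 (sep x y : String) (ys : List String) :
    PySem.Str.join sep (x :: y :: ys) = x ++ sep ++ PySem.Str.join sep (y :: ys) :=
  String.toList_injective (by simp [PySem.Str.toList_join, PySem.Chars.join_cons_cons])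

-- joining after pre-concatenating the head with one more piece
lemma pv_join_glue (sep a b : String) (xs : List String) :
    PySem.Str.join sep ((a ++ sep ++ b) :: xs) = a ++ sep ++ PySem.Str.join sep (b :: xs) := by
  cases xs with
  | nil => rw [pv_join_single, pv_join_single]
  | cons y ys => rw [pv_join_cons2, pv_join_cons2]; simp [String.append_assoc]

lemma pv_append_sep_ne_empty (a b : String) : a ++ ", " ++ b ≠ "" := by
  intro h
  have := congrArg String.toList h
  simp at this

-- A's 'any(line.startswith(bad_content) for item in bad_content)' collapses to one test
lemma pv_any_item (line : String) :
    (pvBadContent.any (fun _item => pvStarts pvBadContent line)) = pvStarts pvBadContent line := by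
  cases h : pvStarts pvBadContent line <;> simp [pvBadContent]

lemma pv_getD_map_succ (o : Option Nat) (n : Nat) : (o.map (· + 1)).getD (n + 1) = o.getD n + 1 := by
  cases o <;> simp

lemma pv_body_cons_bad (line : String) (rest : List String)
    (hb : pvStarts pvBadContent line = true) : pvBody (line :: rest) = [] := by
  simp [pvBody, List.findIdx?_cons, hb]

lemma pv_body_cons_ok (line : String) (rest : List String)
    (hb : pvStarts pvBadContent line = false) : pvBody (line :: rest) = line :: pvBody rest := by
  simp only [pvBody, List.findIdx?_cons, hb, Bool.false_eq_true, if_neg, not_false_eq_true,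
    List.length_cons, pv_getD_map_succ, List.take_succ_cons]

lemma pv_idx_cons_addr (line : String) (rest : List String)
    (hb : pvStarts pvBadContent line = false) (ha : pvStarts pvAddressStart line = true) :
    pvIdx (line :: rest) = 0 := by
  simp [pvIdx, pv_body_cons_ok line rest hb, List.findIdx?_cons, ha]

lemma pv_idx_cons_name (line : String) (rest : List String)
    (hb : pvStarts pvBadContent line = false) (ha : pvStarts pvAddressStart line = false) :
    pvIdx (line :: rest) = pvIdx rest + 1 := by
  simp only [pvIdx, pv_body_cons_ok line rest hb, List.findIdx?_cons, ha, Bool.false_eq_true,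
    if_neg, not_false_eq_true, List.length_cons, pv_getD_map_succ]

lemma pv_body_eq_takeWhile (rest : List String) :
    pvBody rest = rest.takeWhile (fun l => !pvStarts pvBadContent l) := by
  induction rest with
  | nil => simp [pvBody]
  | cons x xs ih =>
    cases h : pvStarts pvBadContent x
    · rw [pv_body_cons_ok x xs h, ih]
      simp [h]
    · rw [pv_body_cons_bad x xs h]
      simp [h]

-- a line starting with an address prefix is nonempty
lemma pv_addr_ne_empty (line : String) (ha : pvStarts pvAddressStart line = true) : line ≠ "" := by
  intro h
  rw [h] at ha
  exact absurd ha (by decide)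

-- once address_flag is set (with a nonempty accumulator) every remaining non-bad line joins the address
lemma pv_loopA_flagged (rest : List String) (name addr : String) (h : addr ≠ "") :
    pvLoopA rest true name addr
      = (name, PySem.Str.join ", " (addr :: rest.takeWhile (fun l => !pvStarts pvBadContent l))) := by
  induction rest generalizing addr with
  | nil => simp [pvLoopA, pv_join_single]
  | cons line rest ih =>
    simp only [pvLoopA, pv_any_item]
    cases hb : pvStarts pvBadContent line
    · simp only [Bool.false_eq_true, if_neg, not_false_eq_true, Bool.or_true, if_pos]
      rw [if_pos h, ih _ (pv_append_sep_ne_empty addr line), pv_join_glue]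
      have ht : (line :: rest).takeWhile (fun l => !pvStarts pvBadContent l)
          = line :: rest.takeWhile (fun l => !pvStarts pvBadContent l) := by
        simp [hb]
      rw [ht, pv_join_cons2]
    · simp [hb, pv_join_single]

-- the main loop invariant: A's loop from an unset flag equals B's slice-and-join form
lemma pv_loopA_eq (rest : List String) (name : String) :
    pvLoopA rest false name ""
      = (PySem.Str.join " " (name :: (pvBody rest).take (pvIdx rest)),
         PySem.Str.join ", " ((pvBody rest).drop (pvIdx rest))) := by
  induction rest generalizing name with
  | nil => simp [pvLoopA, pvBody, pvIdx, pv_join_single, pv_join_nil]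
  | cons line rest ih =>
    simp only [pvLoopA, pv_any_item]
    cases hb : pvStarts pvBadContent line
    · simp only [Bool.false_eq_true, if_neg, not_false_eq_true, Bool.or_false]
      cases ha : pvStarts pvAddressStart line
      · -- still in the name part
        rw [if_neg (by simp), ih (name ++ " " ++ line),
          pv_body_cons_ok line rest hb, pv_idx_cons_name line rest hb ha,
          List.take_succ_cons, List.drop_succ_cons, pv_join_glue, pv_join_cons2]
      · -- address starts at this line: A switches the flag, B splits here
        rw [if_pos rfl, if_neg (by simp),
          pv_loopA_flagged rest name line (pv_addr_ne_empty line ha),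
          pv_body_cons_ok line rest hb, pv_idx_cons_addr line rest hb ha]
        simp only [List.take_zero, List.drop_zero, pv_join_single, pv_body_eq_takeWhile]
    · simp [pvBody, pvIdx, List.findIdx?_cons, hb, pv_join_single, pv_join_nil]

-- ===== VERDICT (by name: the statement is the Claim_ definition above) =====
theorem extract_name_address_spec : Claim_equal_extract_name_address := by
  intro string _dom
  unfold Spec_extract_name_address extract_name_address extract_name_address_alt
  match string with
  | none => rfl
  | some s =>
    by_cases hs : s = ""
    · simp [hs]
    · simp only [hs, if_neg, not_false_eq_true]
      rw [pv_loopA_eq]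
      rfl
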